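-- pv_equiv track=rewrite | github.com/joshua1729/advent-of-code | day_1.py | total_fuel
-- ===== SOURCE A (Python) =====
-- import math
--
-- def total_fuel(weight,tot_fuel,fuel):
--     if ((math.floor(weight/3))-2)>=0:
--         fuel=(math.floor(weight/3))-2
--         weight=fuel
--         return(fuel+total_fuel(weight,tot_fuel,fuel))
--     else:
--         return(0)
--     return(0)
-- ===== SOURCE B (Python) =====
-- import math
--
-- def total_fuel(weight, tot_fuel, fuel):
--     # Iterative re-implementation: accumulate the diminishing fuel steps in a loop.
--     total = 0
--     while math.floor(weight/3) - 2 >= 0: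
--         weight = math.floor(weight/3) - 2
--         total += weight
--     return total
-- ===== Notes on version B (the rewrite author's own statement) =====
-- stated objective: simpler
-- what changed: Replaced the non-tail recursion (fuel + total_fuel(...)) with an iterative while-loop that accumulates the successive fuel steps into a running total.
import Mathlib
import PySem

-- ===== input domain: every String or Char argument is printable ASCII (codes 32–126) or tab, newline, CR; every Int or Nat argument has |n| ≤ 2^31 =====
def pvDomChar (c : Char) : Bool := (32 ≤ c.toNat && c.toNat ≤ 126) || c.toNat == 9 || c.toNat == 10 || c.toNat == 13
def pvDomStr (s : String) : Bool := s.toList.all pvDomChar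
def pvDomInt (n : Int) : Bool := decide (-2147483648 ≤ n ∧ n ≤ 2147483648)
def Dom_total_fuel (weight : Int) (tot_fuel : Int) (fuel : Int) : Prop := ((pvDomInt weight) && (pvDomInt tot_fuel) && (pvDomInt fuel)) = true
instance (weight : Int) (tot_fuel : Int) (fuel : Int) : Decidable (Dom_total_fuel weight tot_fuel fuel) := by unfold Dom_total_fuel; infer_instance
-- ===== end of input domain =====

-- B replaces A's non-tail recursion by an iterative accumulator loop (same cost, constant stack).
-- math.floor(weight/3) is exactly integer floor division for |weight| ≤ 2^31, ported as PySem.Int.floordiv.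

-- ===== PORT A =====
def total_fuel (weight : Int) (tot_fuel : Int) (fuel : Int) : Int :=
  if PySem.Int.floordiv weight 3 - 2 ≥ 0 then
    -- fuel = floor(weight/3) - 2; weight = fuel; return fuel + total_fuel(weight, tot_fuel, fuel)
    let f := PySem.Int.floordiv weight 3 - 2
    f + total_fuel f tot_fuel f
  else 0
termination_by weight.toNat
decreasing_by
  simp only [PySem.Int.floordiv_eq_ediv_of_pos (by norm_num : (0:Int) < 3)] at *
  omega

-- ===== PORT B =====
-- the while loop of Source B: state (weight, total)
def tfLoop (weight : Int) (total : Int) : Int :=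
  if PySem.Int.floordiv weight 3 - 2 ≥ 0 then
    tfLoop (PySem.Int.floordiv weight 3 - 2) (total + (PySem.Int.floordiv weight 3 - 2))
  else total
termination_by weight.toNat
decreasing_by
  simp only [PySem.Int.floordiv_eq_ediv_of_pos (by norm_num : (0:Int) < 3)] at *
  omega

def total_fuel_alt (weight : Int) (tot_fuel : Int) (fuel : Int) : Int :=
  tfLoop weight 0

-- ===== PRECONDITION & SPEC =====
def Spec_total_fuel (weight : Int) (tot_fuel : Int) (fuel : Int) (out : Int) : Prop := out = total_fuel_alt weight tot_fuel fuel
instance (weight : Int) (tot_fuel : Int) (fuel : Int) (out : Int) : Decidable (Spec_total_fuel weight tot_fuel fuel out) := by unfold Spec_total_fuel; infer_instance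

-- ===== CLAIM (what is proved, stated in full; the proofs are below) =====
def Claim_equal_total_fuel : Prop := ∀ (weight : Int) (tot_fuel : Int) (fuel : Int), Dom_total_fuel weight tot_fuel fuel → Spec_total_fuel weight tot_fuel fuel (total_fuel weight tot_fuel fuel)

-- ===== LEMMAS AND PROOFS =====
theorem tfLoop_eq (w acc : Int) : ∀ (t f : Int), tfLoop w acc = acc + total_fuel w t f := by
  fun_induction tfLoop w acc with
  | case1 w acc h ih =>
    intro t f
    rw [total_fuel]
    simp only [if_pos h]
    rw [ih t (PySem.Int.floordiv w 3 - 2)]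
    ring
  | case2 w acc h =>
    intro t f
    rw [total_fuel]
    simp only [if_neg h]
    ring

-- ===== VERDICT (by name: the statement is the Claim_ definition above) =====
theorem total_fuel_spec : Claim_equal_total_fuel := by
  intro w t f _
  unfold Spec_total_fuel total_fuel_alt
  rw [tfLoop_eq w 0 t f]; ring
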